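-- pv_equiv track=rewrite | github.com/nicolas-dalton/rc4-one-time-pad | HW02-NicolasDalton.py | oneTimePad
-- ===== SOURCE A (Python) =====
-- def convertToBits(textList):
--     bitList = []
--     for i in textList:
--         bitList.append(format(ord(i), '08b'))
--     return bitList
--
-- def convertToString(bytesList):
--     characterList = []
--     for i in bytesList:
--         characterList.append(chr(int(i, 2)))
--     return characterList
--
-- def exclusiveOr(byteString1, byteString2):
--     returnValue = ""
--     for i in range(len(byteString1)):
--         if byteString1[i] == byteString2[i]:
--             returnValue+="0"
--         if byteString1[i] != byteString2[i]:
--             returnValue += "1"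
--     return returnValue
--
-- def oneTimePad(text, key):
--     #Converts the text and key strings to list of bytes
--     textList = list(text)
--     textBytesList = convertToBits(textList)
--     keyList = list(key)
--     keyBytesList = convertToBits(keyList)
--     newTextByteList = []
--     #For each byte in order in both message and key list use exclusive or operation
--     #Each byte must be converted to a String
--     for i in range(len(textBytesList)):
--         characterByteString = str(textBytesList[i])
--         keyByteString = str(keyBytesList[i])
--         byteString = exclusiveOr(characterByteString, keyByteString)
--         decimalCharacter = int(byteString, 2)
--         newTextByteList.append(format(decimalCharacter, '08b'))
--     #Converts each byte in the new message list to its corresponding ASCII characters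
--     newTextList = convertToString(newTextByteList)
--     newText = ""
--     for i in range(len(newTextList)):
--         newText += newTextList[i]
--     return newText
-- ===== SOURCE B (Python) =====
-- def oneTimePad(text, key):
--     # XOR each character code of text with the matching key character code.
--     # Explicit indexing into key: a shorter key raises IndexError (like A),
--     # a longer key is truncated.
--     return "".join(chr(ord(text[i]) ^ ord(key[i])) for i in range(len(text)))
-- ===== Notes on version B (the rewrite author's own statement) =====
-- stated objective: simpler
-- what changed: Replaces A's per-character bit-string pipeline (format to '08b', character-wise string XOR, int(.,2) parse, chr) by a single pass computing chr(ord(text[i]) ^ ord(key[i])) joined into a string; Pre_ excludes keys shorter than the text, where both implementations raise IndexError.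
import Mathlib
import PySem

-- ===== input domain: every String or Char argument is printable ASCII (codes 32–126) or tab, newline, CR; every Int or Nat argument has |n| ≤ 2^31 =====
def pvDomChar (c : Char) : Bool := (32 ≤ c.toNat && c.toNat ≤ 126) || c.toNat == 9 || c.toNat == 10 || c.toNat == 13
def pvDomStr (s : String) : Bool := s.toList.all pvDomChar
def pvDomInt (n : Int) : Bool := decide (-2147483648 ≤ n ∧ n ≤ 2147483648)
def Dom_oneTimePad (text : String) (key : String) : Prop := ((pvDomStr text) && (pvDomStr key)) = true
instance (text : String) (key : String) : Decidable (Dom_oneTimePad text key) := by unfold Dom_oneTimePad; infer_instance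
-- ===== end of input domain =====

-- B replaces A's bit-string pipeline by a single pass XOR-ing character codes (objective: simpler).

-- ===== PORT A =====
-- format(n, '08b'): hand port of the builtin; exact for 0 ≤ n < 256 (Dom keeps all codes ≤ 126)
def fmt08b (n : Nat) : String :=
  String.ofList (((List.range 8).reverse).map (fun i => if n.testBit i then '1' else '0'))

-- int(s, 2): hand port of the builtin; exact for nonempty strings of '0'/'1' (the only inputs A feeds it)
def parseBin (s : String) : Nat :=
  s.toList.foldl (fun acc c => 2 * acc + (if c = '1' then 1 else 0)) 0

def convertToBits (textList : List Char) : List String :=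
  textList.foldl (fun bitList i => bitList ++ [fmt08b i.toNat]) []

def convertToString (bytesList : List String) : List Char :=
  bytesList.foldl (fun characterList i => characterList ++ [Char.ofNat (parseBin i)]) []

-- byteString2[i] raises IndexError when byteString2 is shorter (getD is exact for the
-- equal-length 8-bit strings A always passes; Pre_ excludes the short-key IndexError)
def exclusiveOr (byteString1 byteString2 : String) : String :=
  (List.range byteString1.toList.length).foldl (fun returnValue i =>
    if byteString1.toList.getD i ' ' = byteString2.toList.getD i ' '
    then returnValue ++ "0" else returnValue ++ "1") ""

def oneTimePad (text : String) (key : String) : String :=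
  let textList := text.toList
  let textBytesList := convertToBits textList
  let keyList := key.toList
  let keyBytesList := convertToBits keyList
  -- keyBytesList[i] raises IndexError when the key is shorter than the text (excluded by Pre_)
  let newTextByteList := (List.range textBytesList.length).foldl (fun acc i =>
    let characterByteString := textBytesList.getD i ""
    let keyByteString := keyBytesList.getD i ""
    let byteString := exclusiveOr characterByteString keyByteString
    let decimalCharacter := parseBin byteString
    acc ++ [fmt08b decimalCharacter]) []
  let newTextList := convertToString newTextByteList
  (List.range newTextList.length).foldl (fun newText i => newText.push (newTextList.getD i ' ')) ""

-- ===== PORT B =====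
-- text[i] / key[i] never raise under Pre_; getD is exact there
def oneTimePad_alt (text : String) (key : String) : String :=
  String.ofList ((List.range text.toList.length).map (fun i =>
    Char.ofNat ((text.toList.getD i ' ').toNat ^^^ (key.toList.getD i ' ').toNat)))

-- ===== PRECONDITION & SPEC =====
-- A raises IndexError when the key is shorter than the text; excluded (B raises there too).
def Pre_oneTimePad (text : String) (key : String) : Prop :=
  text.toList.length ≤ key.toList.length
instance (text : String) (key : String) : Decidable (Pre_oneTimePad text key) := by
  unfold Pre_oneTimePad; infer_instance

def pvWitness_oneTimePad : String × String := ("hello", "world")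

def Spec_oneTimePad (text : String) (key : String) (out : String) : Prop := out = oneTimePad_alt text key
instance (text : String) (key : String) (out : String) : Decidable (Spec_oneTimePad text key out) := by unfold Spec_oneTimePad; infer_instance

-- ===== CLAIM (what is proved, stated in full; the proofs are below) =====
def Claim_equal_oneTimePad : Prop := ∀ (text : String) (key : String), Dom_oneTimePad text key → Pre_oneTimePad text key → Spec_oneTimePad text key (oneTimePad text key)

-- ===== LEMMAS AND PROOFS =====

-- append-accumulator folds are maps
theorem foldl_app {α β : Type} (f : α → β) :
    ∀ (l : List α) (acc : List β), l.foldl (fun a c => a ++ [f c]) acc = acc ++ l.map f := by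
  intro l
  induction l with
  | nil => simp
  | cons c l ih => intro acc; simp [List.foldl, ih]

-- indexing two lists over range(n), n = len l1, is zipWith (when l2 is long enough)
theorem map_range_zip {α β γ : Type} (f : α → β → γ) (d1 : α) (d2 : β) :
    ∀ (l1 : List α) (n : Nat) (l2 : List β), l1.length = n → n ≤ l2.length →
      (List.range n).map (fun i => f (l1.getD i d1) (l2.getD i d2)) = List.zipWith f l1 l2 := by
  intro l1
  induction l1 with
  | nil => intro n l2 h _; subst h; simp
  | cons a l1 ih =>
    intro n l2 h hle
    subst h
    cases l2 with
    | nil => simp at hle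
    | cons b l2 =>
      simp only [List.length_cons, List.range_succ_eq_map, List.map_cons, List.map_map]
      simp only [List.getD_cons_zero, List.zipWith_cons_cons]
      exact congrArg _ (ih l1.length l2 rfl (by simpa using hle))

theorem foldl_push (l : List Char) (s : String) :
    l.foldl String.push s = s ++ String.ofList l := by
  induction l generalizing s with
  | nil => simp
  | cons c l ih =>
    simp only [List.foldl_cons, ih]
    apply String.toList_injective
    simp

theorem map_range_getD {α : Type} (d : α) :
    ∀ (l : List α), (List.range l.length).map (fun i => l.getD i d) = l := by
  intro l
  induction l with
  | nil => simp
  | cons a l ih =>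
    simp only [List.length_cons, List.range_succ_eq_map, List.map_cons, List.map_map]
    simp only [List.getD_cons_zero]
    exact congrArg _ ih

-- the final character-building loop is String.ofList
theorem push_loop (l : List Char) (n : Nat) (h : l.length = n) :
    (List.range n).foldl (fun newText i => newText.push (l.getD i ' ')) "" = String.ofList l := by
  subst h
  rw [← List.foldl_map, map_range_getD]
  simpa using foldl_push l ""

-- the bit of n at position i, as A's character
def bitChar (n : Nat) (i : Nat) : Char := if n.testBit i then '1' else '0'

theorem fmt08b_toList (n : Nat) : (fmt08b n).toList =
    [bitChar n 7, bitChar n 6, bitChar n 5, bitChar n 4,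
     bitChar n 3, bitChar n 2, bitChar n 1, bitChar n 0] := by
  simp [fmt08b, bitChar, List.range_succ]

theorem exclusiveOr_step (acc : String) (c1 c2 : Char) :
    (if c1 = c2 then acc ++ "0" else acc ++ "1") = acc ++ (if c1 = c2 then "0" else "1") := by
  split_ifs <;> rfl

theorem exclusiveOr_toList (s1 s2 : String)
    (a7 a6 a5 a4 a3 a2 a1 a0 b7 b6 b5 b4 b3 b2 b1 b0 : Char)
    (h1 : s1.toList = [a7, a6, a5, a4, a3, a2, a1, a0])
    (h2 : s2.toList = [b7, b6, b5, b4, b3, b2, b1, b0]) :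
    (exclusiveOr s1 s2).toList =
      (if a7 = b7 then ['0'] else ['1']) ++ (if a6 = b6 then ['0'] else ['1'])
      ++ (if a5 = b5 then ['0'] else ['1']) ++ (if a4 = b4 then ['0'] else ['1'])
      ++ (if a3 = b3 then ['0'] else ['1']) ++ (if a2 = b2 then ['0'] else ['1'])
      ++ (if a1 = b1 then ['0'] else ['1']) ++ (if a0 = b0 then ['0'] else ['1']) := by
  simp only [exclusiveOr, h1, h2, List.length_cons, List.length_nil]
  norm_num [List.range_succ, List.foldl_append, List.foldl_cons, List.foldl_nil,
    List.getD_cons_zero, List.getD_cons_succ, exclusiveOr_step]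
  simp [apply_ite String.toList]

-- the two '1'/'0' characters compare equal iff the bits agree
theorem bitChar_cmp (n m i : Nat) :
    (if bitChar n i = bitChar m i then ['0'] else ['1']) = [bitChar (n ^^^ m) i] := by
  cases hn : n.testBit i <;> cases hm : m.testBit i <;>
    simp [bitChar, Nat.testBit_xor, hn, hm]

-- reconstruction of m < 256 from its 8 bits
set_option maxRecDepth 8000 in
theorem bitsum (m : Fin 256) :
    128 * (if m.val.testBit 7 then 1 else 0) + 64 * (if m.val.testBit 6 then 1 else 0)
    + 32 * (if m.val.testBit 5 then 1 else 0) + 16 * (if m.val.testBit 4 then 1 else 0)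
    + 8 * (if m.val.testBit 3 then 1 else 0) + 4 * (if m.val.testBit 2 then 1 else 0)
    + 2 * (if m.val.testBit 1 then 1 else 0) + (if m.val.testBit 0 then 1 else 0) = m.val := by
  revert m; decide

theorem parseBin_bits (s : String) (m : Nat) (hm : m < 256)
    (h : s.toList = [bitChar m 7, bitChar m 6, bitChar m 5, bitChar m 4,
                     bitChar m 3, bitChar m 2, bitChar m 1, bitChar m 0]) :
    parseBin s = m := by
  have key := bitsum ⟨m, hm⟩
  simp only [Fin.val_mk] at key
  have step : ∀ (b : Bool), (if (if b then '1' else '0') = '1' then (1 : Nat) else 0)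
      = (if b then 1 else 0) := by intro b; cases b <;> simp
  simp only [parseBin, h, List.foldl, bitChar, step]
  generalize (if m.testBit 7 then (1:Nat) else 0) = x7 at *
  generalize (if m.testBit 6 then (1:Nat) else 0) = x6 at *
  generalize (if m.testBit 5 then (1:Nat) else 0) = x5 at *
  generalize (if m.testBit 4 then (1:Nat) else 0) = x4 at *
  generalize (if m.testBit 3 then (1:Nat) else 0) = x3 at *
  generalize (if m.testBit 2 then (1:Nat) else 0) = x2 at *
  generalize (if m.testBit 1 then (1:Nat) else 0) = x1 at *
  generalize (if m.testBit 0 then (1:Nat) else 0) = x0 at *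
  omega

theorem parseBin_fmt08b (m : Nat) (hm : m < 256) : parseBin (fmt08b m) = m :=
  parseBin_bits _ m hm (fmt08b_toList m)

-- the whole per-character pipeline of A is XOR
theorem pipeline (n m : Nat) (hn : n < 128) (hm : m < 128) :
    parseBin (fmt08b (parseBin (exclusiveOr (fmt08b n) (fmt08b m)))) = n ^^^ m := by
  have hn' : n < 2 ^ 8 := by omega
  have hm' : m < 2 ^ 8 := by omega
  have hx : n ^^^ m < 256 := by simpa using Nat.xor_lt_two_pow hn' hm'
  have hxl : (exclusiveOr (fmt08b n) (fmt08b m)).toList =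
      [bitChar (n ^^^ m) 7, bitChar (n ^^^ m) 6, bitChar (n ^^^ m) 5, bitChar (n ^^^ m) 4,
       bitChar (n ^^^ m) 3, bitChar (n ^^^ m) 2, bitChar (n ^^^ m) 1, bitChar (n ^^^ m) 0] := by
    rw [exclusiveOr_toList _ _ _ _ _ _ _ _ _ _ _ _ _ _ _ _ _ _ (fmt08b_toList n) (fmt08b_toList m)]
    simp only [bitChar_cmp]
    rfl
  have h1 : parseBin (exclusiveOr (fmt08b n) (fmt08b m)) = n ^^^ m :=
    parseBin_bits _ _ hx hxl
  rw [h1, parseBin_fmt08b _ hx]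

theorem zipWith_congr_mem {α β γ : Type} (f g : α → β → γ)
    (l1 : List α) (l2 : List β)
    (h : ∀ a ∈ l1, ∀ b ∈ l2, f a b = g a b) :
    List.zipWith f l1 l2 = List.zipWith g l1 l2 := by
  induction l1 generalizing l2 with
  | nil => simp
  | cons a l1 ih =>
    cases l2 with
    | nil => simp
    | cons b l2 =>
      simp only [List.zipWith_cons_cons]
      refine congrArg₂ _ (h a (by simp) b (by simp)) (ih l2 ?_)
      intro x hx y hy; exact h x (by simp [hx]) y (by simp [hy])

-- ===== VERDICT (by name: the statement is the Claim_ definition above) =====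
theorem oneTimePad_spec : Claim_equal_oneTimePad := by
  intro text key hdom hpre
  unfold Spec_oneTimePad oneTimePad oneTimePad_alt
  have hlen : text.toList.length ≤ key.toList.length := hpre
  simp only [convertToBits, convertToString, foldl_app, List.nil_append, List.map_map,
    List.length_map, List.length_range, Function.comp_def]
  rw [push_loop _ _ (by simp)]
  refine congrArg _ ?_
  rw [map_range_zip (fun s1 s2 => Char.ofNat (parseBin (fmt08b (parseBin (exclusiveOr s1 s2))))) "" ""
      (text.toList.map fun c => fmt08b c.toNat) text.toList.length
      (key.toList.map fun c => fmt08b c.toNat) (by simp) (by simpa using hlen)]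
  rw [map_range_zip (fun c k => Char.ofNat (c.toNat ^^^ k.toNat)) ' ' ' '
      text.toList text.toList.length key.toList rfl hlen]
  simp only [List.zipWith_map]
  -- pointwise agreement using Dom (all codes < 128)
  refine zipWith_congr_mem _ _ _ _ ?_
  intro a ha b hb
  have hdt : pvDomStr text = true ∧ pvDomStr key = true := by
    have := hdom; unfold Dom_oneTimePad at this; simpa using this
  have hca : pvDomChar a = true := by
    have := hdt.1; unfold pvDomStr at this; exact (List.all_eq_true.mp this) a ha
  have hcb : pvDomChar b = true := by
    have := hdt.2; unfold pvDomStr at this; exact (List.all_eq_true.mp this) b hb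
  have hna : a.toNat < 128 := by unfold pvDomChar at hca; simp at hca; omega
  have hnb : b.toNat < 128 := by unfold pvDomChar at hcb; simp at hcb; omega
  rw [pipeline a.toNat b.toNat hna hnb]
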